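-- pv_equiv track=rewrite | github.com/milvus-io/pymilvus | pymilvus/client/prepare.py | _validate_and_collect_struct_values
-- ===== SOURCE A (Python) =====
-- from typing import Any, Dict, Iterable, List, Mapping, Optional, Union
--
-- def _validate_and_collect_struct_values(
--     values: List, expected_fields: set, struct_field_name: str = ""
-- ) -> Dict[str, List]:
--     """Validate struct items and collect field values."""
--     field_values = {field: [] for field in expected_fields}
--     field_prefix = f"Field '{struct_field_name}': " if struct_field_name else ""
--
--     for idx, struct_item in enumerate(values):
--         if not isinstance(struct_item, dict):
--             msg = f"{field_prefix}Element at index {idx} must be dict, got {type(struct_item).__name__}"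
--             raise TypeError(msg)
--
--         # Validate fields
--         actual_fields = set(struct_item.keys())
--         missing_fields = expected_fields - actual_fields
--         extra_fields = actual_fields - expected_fields
--
--         if missing_fields:
--             msg = f"{field_prefix}Element at index {idx} missing required fields: {missing_fields}"
--             raise ValueError(msg)
--         if extra_fields:
--             msg = f"{field_prefix}Element at index {idx} has unexpected fields: {extra_fields}"
--             raise ValueError(msg)
--
--         # Collect values
--         for field_name in expected_fields:
--             value = struct_item[field_name]
--             if value is None:
--                 msg = f"{field_prefix}Field '{field_name}' in element at index {idx} cannot be None"
--                 raise ValueError(msg)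
--             field_values[field_name].append(value)
--
--     return field_values
-- ===== SOURCE B (Python) =====
-- def _validate_and_collect_struct_values(values, expected_fields, struct_field_name=""):
--     """Audit pass (size + subset test, no set subtraction), then field-outer column build."""
--     field_prefix = f"Field '{struct_field_name}': " if struct_field_name else ""
--     n = len(expected_fields)
--
--     # Audit pass: each element must be a dict whose key set equals expected_fields;
--     # since dict keys are distinct, that holds iff it has n keys and contains every
--     # expected field. (Inputs where this audit fires lie outside Pre_: A raises there
--     # too, with its own messages.)
--     for idx, item in enumerate(values):
--         if not isinstance(item, dict):
--             msg = f"{field_prefix}Element at index {idx} must be dict, got {type(item).__name__}"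
--             raise TypeError(msg)
--         if len(item) != n or any(f not in item for f in expected_fields):
--             msg = f"{field_prefix}Element at index {idx} does not have exactly the expected fields {expected_fields}"
--             raise ValueError(msg)
--
--     # Build the result column by column (field-outer, item-inner); no mutable
--     # per-field accumulator dict is ever threaded through the item loop.
--     out = {}
--     for field in expected_fields:
--         column = []
--         for idx, item in enumerate(values):
--             v = item[field]
--             if v is None:
--                 msg = f"{field_prefix}Field '{field}' in element at index {idx} cannot be None"
--                 raise ValueError(msg)
--             column.append(v)
--         out[field] = column
--     return out
-- ===== Notes on version B (the rewrite author's own statement) =====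
-- stated objective: alternative
-- what changed: A walks items once, doing set-subtraction validation and appending each value into a pre-initialized mutable dict of per-field lists; B first audits every item by a counting criterion (len(item) == len(expected_fields) and expected subset of keys -- no set subtraction), then builds each field's column in a separate field-outer/item-inner pass with no accumulator dict. Both raise exactly on the same inputs (message texts differ on the audit path; those inputs are outside Pre_).
import Mathlib
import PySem

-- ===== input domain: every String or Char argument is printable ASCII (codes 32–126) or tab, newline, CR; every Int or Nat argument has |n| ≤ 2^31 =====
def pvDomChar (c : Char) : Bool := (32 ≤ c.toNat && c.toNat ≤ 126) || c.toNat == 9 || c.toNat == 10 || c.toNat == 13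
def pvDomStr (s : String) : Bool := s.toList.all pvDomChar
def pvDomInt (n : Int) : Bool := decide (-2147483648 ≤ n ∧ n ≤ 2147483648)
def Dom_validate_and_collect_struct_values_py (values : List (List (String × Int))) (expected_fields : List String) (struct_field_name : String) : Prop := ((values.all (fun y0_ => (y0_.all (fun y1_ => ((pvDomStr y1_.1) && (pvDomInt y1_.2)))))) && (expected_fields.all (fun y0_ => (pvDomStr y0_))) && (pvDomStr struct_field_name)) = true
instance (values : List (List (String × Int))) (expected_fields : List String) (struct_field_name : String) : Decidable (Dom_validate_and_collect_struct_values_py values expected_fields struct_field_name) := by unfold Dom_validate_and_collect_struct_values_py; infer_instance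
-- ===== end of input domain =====

-- B first audits every item by a counting criterion (key count = field count and expected ⊆ keys,
-- no set subtraction) and then builds each field's column in a separate field-outer pass with no
-- accumulator dict, where A interleaves set-difference validation with per-item appends into a
-- mutable dict of lists; objective: alternative decomposition, same asymptotic cost.
-- Neither version mutates its arguments.

-- ===== PORT A =====
-- one iteration of A's `for idx, struct_item in enumerate(values)` body; `none` = A raises
-- (idx and struct_field_name appear only in exception messages, so they do not affect the value;
-- the isinstance and `value is None` checks can never fire here: items are typed dicts of Int).
def vacsA_step (expected : PySem.Set String) (fv : PySem.Dict String (List Int)) (item : List (String × Int)) : Option (PySem.Dict String (List Int)) :=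
  let d := PySem.Dict.ofList item
  let actual : PySem.Set String := PySem.Set.ofList d.keys
  let missing := PySem.Set.diff expected actual
  let extra := PySem.Set.diff actual expected
  if missing ≠ [] then none        -- raise ValueError: missing required fields
  else if extra ≠ [] then none     -- raise ValueError: unexpected fields
  else
    -- for field_name in expected_fields: field_values[field_name].append(struct_item[field_name])
    -- modify with default [] is exact: the key is always present (initialized below; missing = [])
    some (expected.foldl (fun acc f => acc.modify f [] (fun l => l ++ [PySem.Dict.getD d f 0])) fv)

def vacsA_loop (expected : PySem.Set String) : List (List (String × Int)) → PySem.Dict String (List Int) → Option (PySem.Dict String (List Int))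
  | [], fv => some fv
  | it :: rest, fv =>
    match vacsA_step expected fv it with
    | none => none
    | some fv' => vacsA_loop expected rest fv'

def validate_and_collect_struct_values_py (values : List (List (String × Int))) (expected_fields : List String) (struct_field_name : String) : List (String × List Int) :=
  let expected : PySem.Set String := PySem.Set.ofList expected_fields   -- the parameter is a Python set
  let init := expected.foldl (fun d f => PySem.Dict.insert d f ([] : List Int)) PySem.Dict.empty
  match vacsA_loop expected values init with
  | some fv => fv.items
  | none => []   -- A raised; these inputs are excluded by Pre_

-- ===== PORT B =====
-- B's audit of one item: `len(item) == n and not any(f not in item for f in expected_fields)`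
-- (false = B raises ValueError there; the isinstance branch cannot fire on typed input)
def vacsB_audit (expected : PySem.Set String) (n : Nat) (item : List (String × Int)) : Bool :=
  let d := PySem.Dict.ofList item
  d.size == n && expected.all (fun f => d.contains f)

def validate_and_collect_struct_values_py_alt (values : List (List (String × Int))) (expected_fields : List String) (struct_field_name : String) : List (String × List Int) :=
  let expected : PySem.Set String := PySem.Set.ofList expected_fields
  let n := expected.length   -- len(expected_fields)
  if values.all (vacsB_audit expected n) then
    -- field-outer column build: out[field] = [item[field] for item in values] (fresh keys append,
    -- so the dict's items are exactly this map; the None branch cannot fire on Int values)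
    expected.map (fun f => (f, values.map (fun item => PySem.Dict.getD (PySem.Dict.ofList item) f 0)))
  else []   -- B raised; excluded by Pre_

-- ===== PRECONDITION & SPEC =====
-- Pre_ excludes exactly the inputs where A raises ValueError: some item whose key set differs
-- from the expected field set (within the typed domain the TypeError/None branches cannot fire).
def Pre_validate_and_collect_struct_values_py (values : List (List (String × Int))) (expected_fields : List String) (struct_field_name : String) : Prop :=
  ∀ it ∈ values, (∀ f ∈ expected_fields, f ∈ it.map Prod.fst) ∧ (∀ k ∈ it.map Prod.fst, k ∈ expected_fields)
instance (values : List (List (String × Int))) (expected_fields : List String) (struct_field_name : String) : Decidable (Pre_validate_and_collect_struct_values_py values expected_fields struct_field_name) := by unfold Pre_validate_and_collect_struct_values_py; infer_instance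

def pvWitness_validate_and_collect_struct_values_py : (List (List (String × Int))) × List String × String :=
  ([[("a", 1), ("b", 2)], [("b", 4), ("a", 3)]], ["a", "b"], "s")

def Spec_validate_and_collect_struct_values_py (values : List (List (String × Int))) (expected_fields : List String) (struct_field_name : String) (out : List (String × List Int)) : Prop := out = validate_and_collect_struct_values_py_alt values expected_fields struct_field_name
instance (values : List (List (String × Int))) (expected_fields : List String) (struct_field_name : String) (out : List (String × List Int)) : Decidable (Spec_validate_and_collect_struct_values_py values expected_fields struct_field_name out) := by unfold Spec_validate_and_collect_struct_values_py; infer_instance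

-- ===== CLAIM (what is proved, stated in full; the proofs are below) =====
def Claim_equal_validate_and_collect_struct_values_py : Prop := ∀ (values : List (List (String × Int))) (expected_fields : List String) (struct_field_name : String), Dom_validate_and_collect_struct_values_py values expected_fields struct_field_name → Pre_validate_and_collect_struct_values_py values expected_fields struct_field_name → Spec_validate_and_collect_struct_values_py values expected_fields struct_field_name (validate_and_collect_struct_values_py values expected_fields struct_field_name)

-- ===== LEMMAS AND PROOFS =====

lemma diff_eq_nil_of_subset {s t : PySem.Set String} (h : ∀ x ∈ s, x ∈ t) : PySem.Set.diff s t = [] := by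
  simp only [PySem.Set.diff, List.filter_eq_nil_iff]
  intro a ha
  simp [PySem.Set.contains_eq_listContains, h a ha]

lemma mem_keys_ofList (item : List (String × Int)) (k : String) :
    k ∈ (PySem.Dict.ofList item).keys ↔ k ∈ item.map Prod.fst := by
  show k ∈ (List.foldl (fun acc p => acc.insert p.1 p.2) PySem.Dict.empty item).keys ↔ _
  rw [PySem.Dict.keys_foldl_insert_key item Prod.fst (fun _ p => p.2) PySem.Dict.empty]
  rw [PySem.Dict.keys_empty, PySem.Set.update_nil_left]
  exact PySem.Set.mem_ofList _ _

-- under Pre_, every item passes A's set-difference validation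
lemma valid_of_pre (efs : List String) (it : List (String × Int))
    (h1 : ∀ f ∈ efs, f ∈ it.map Prod.fst) (h2 : ∀ k ∈ it.map Prod.fst, k ∈ efs) :
    PySem.Set.diff (PySem.Set.ofList efs) (PySem.Set.ofList (PySem.Dict.ofList it).keys) = [] ∧
    PySem.Set.diff (PySem.Set.ofList (PySem.Dict.ofList it).keys) (PySem.Set.ofList efs) = [] := by
  constructor
  · apply diff_eq_nil_of_subset
    intro x hx
    rw [PySem.Set.mem_ofList] at hx ⊢
    exact (mem_keys_ofList it x).2 (h1 x hx)
  · apply diff_eq_nil_of_subset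
    intro x hx
    rw [PySem.Set.mem_ofList] at hx ⊢
    exact h2 x ((mem_keys_ofList it x).1 hx)

-- under Pre_, every item passes B's counting audit
lemma audit_of_pre (efs : List String) (it : List (String × Int))
    (h1 : ∀ f ∈ efs, f ∈ it.map Prod.fst) (h2 : ∀ k ∈ it.map Prod.fst, k ∈ efs) :
    vacsB_audit (PySem.Set.ofList efs) (PySem.Set.ofList efs).length it = true := by
  unfold vacsB_audit
  have hknd : (PySem.Dict.ofList it).keys.Nodup := PySem.Dict.nodup_keys_ofList it
  have hperm : (PySem.Dict.ofList it).keys.Perm (PySem.Set.ofList efs) := by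
    rw [List.perm_ext_iff_of_nodup hknd (PySem.Set.nodup_ofList efs)]
    intro a
    rw [mem_keys_ofList, PySem.Set.mem_ofList]
    exact ⟨h2 a, fun h => h1 a h⟩
  have hsz : (PySem.Dict.ofList it).size = (PySem.Set.ofList efs).length := by
    have : (PySem.Dict.ofList it).keys.length = (PySem.Set.ofList efs).length := hperm.length_eq
    simpa [PySem.Dict.keys, PySem.Dict.size] using this
  simp only [Bool.and_eq_true, beq_iff_eq, hsz, List.all_eq_true, true_and]
  intro f hf
  rw [PySem.Dict.contains_iff_mem_keys, mem_keys_ofList]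
  exact h1 f ((PySem.Set.mem_ofList efs f).1 hf)

-- A's loop never fails when every item is valid, and equals the plain foldl of its accumulation step
lemma vacsA_loop_eq (expected : PySem.Set String) (vs : List (List (String × Int)))
    (hv : ∀ it ∈ vs, PySem.Set.diff expected (PySem.Set.ofList (PySem.Dict.ofList it).keys) = [] ∧
                     PySem.Set.diff (PySem.Set.ofList (PySem.Dict.ofList it).keys) expected = []) (fv : PySem.Dict String (List Int)) :
    vacsA_loop expected vs fv =
      some (vs.foldl (fun fv it => expected.foldl
        (fun acc f => acc.modify f [] (fun l => l ++ [PySem.Dict.getD (PySem.Dict.ofList it) f 0])) fv) fv) := by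
  induction vs generalizing fv with
  | nil => rfl
  | cons it rest ih =>
    have h := hv it (List.mem_cons_self ..)
    simp only [vacsA_loop, vacsA_step, h.1, h.2, List.foldl_cons]
    exact ih (fun x hx => hv x (List.mem_cons_of_mem _ hx)) _

lemma set_update_self (s : PySem.Set String) : PySem.Set.update s s = s := by
  rw [PySem.Set.update_eq_append_filter]
  have h : ∀ y ∈ PySem.Set.ofList s, ¬ (!PySem.Set.contains s y) = true := by
    intro y hy
    simp [PySem.Set.contains_eq_listContains, (PySem.Set.mem_ofList s y).1 hy]
  rw [List.filter_eq_nil_iff.2 h, List.append_nil]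

-- the key list is preserved by the whole accumulation
lemma keys_outer (expected : PySem.Set String) (vs : List (List (String × Int))) (fv : PySem.Dict String (List Int)) (hk : fv.keys = expected) :
    (vs.foldl (fun fv it => expected.foldl
      (fun acc f => acc.modify f [] (fun l => l ++ [PySem.Dict.getD (PySem.Dict.ofList it) f 0])) fv) fv).keys = expected := by
  induction vs generalizing fv with
  | nil => exact hk
  | cons it rest ih =>
    apply ih
    rw [PySem.Dict.keys_foldl_modify expected ([] : List Int)
      (fun _ f _ => _ ++ [PySem.Dict.getD (PySem.Dict.ofList it) f 0]) fv]
    rw [hk, set_update_self]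

-- one item's accumulation appends exactly its value at each expected field
lemma getD_inner (expected : PySem.Set String) (hnd : expected.Nodup) (it : List (String × Int)) (fv : PySem.Dict String (List Int)) (c : String) (hc : c ∈ expected) :
    (expected.foldl (fun acc f => acc.modify f [] (fun l => l ++ [PySem.Dict.getD (PySem.Dict.ofList it) f 0])) fv).getD c []
    = fv.getD c [] ++ [PySem.Dict.getD (PySem.Dict.ofList it) c 0] := by
  have h1 : (expected.foldl (fun acc f => acc.modify f [] (fun l => l ++ [PySem.Dict.getD (PySem.Dict.ofList it) f 0])) fv)
      = List.foldl (fun d p => d.modify p.1 [] fun x => x ++ [p.2]) fv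
          (expected.map (fun f => (f, PySem.Dict.getD (PySem.Dict.ofList it) f 0))) := by
    rw [List.foldl_map]
  rw [h1, PySem.Dict.getD_foldl_modify_append]
  congr 1
  rw [List.filter_map]
  have h2 : (fun (p : String × Int) => p.1 == c) ∘ (fun f => (f, PySem.Dict.getD (PySem.Dict.ofList it) f 0)) = (fun x => x == c) := rfl
  rw [h2, List.filter_beq, List.count_eq_one_of_mem hnd hc]
  rfl

-- value at each expected field after the whole accumulation
lemma getD_outer (expected : PySem.Set String) (hnd : expected.Nodup) (vs : List (List (String × Int))) (fv : PySem.Dict String (List Int)) (c : String) (hc : c ∈ expected) :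
    (vs.foldl (fun fv it => expected.foldl
      (fun acc f => acc.modify f [] (fun l => l ++ [PySem.Dict.getD (PySem.Dict.ofList it) f 0])) fv) fv).getD c []
    = fv.getD c [] ++ vs.map (fun it => PySem.Dict.getD (PySem.Dict.ofList it) c 0) := by
  induction vs generalizing fv with
  | nil => simp
  | cons it rest ih =>
    simp only [List.foldl_cons, List.map_cons]
    rw [ih _, getD_inner expected hnd it fv c hc, List.append_assoc]
    rfl

lemma init_keys (expected : PySem.Set String) :
    (expected.foldl (fun d f => PySem.Dict.insert d f ([] : List Int)) PySem.Dict.empty).keys = PySem.Set.ofList expected := by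
  rw [PySem.Dict.keys_foldl_insert expected (fun _ _ => ([] : List Int)) PySem.Dict.empty]
  rw [PySem.Dict.keys_empty, PySem.Set.update_nil_left]

lemma init_getD (expected : List String) (d : PySem.Dict String (List Int)) {c : String} (hd : d.getD c [] = []) :
    (expected.foldl (fun d f => PySem.Dict.insert d f ([] : List Int)) d).getD c ([] : List Int) = [] := by
  induction expected generalizing d with
  | nil => exact hd
  | cons f rest ih =>
    simp only [List.foldl_cons]
    apply ih
    rw [PySem.Dict.getD_insert]
    split <;> simp [hd]

lemma vacs_main (values : List (List (String × Int))) (efs : List String) (name : String)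
    (hpre : ∀ it ∈ values, (∀ f ∈ efs, f ∈ it.map Prod.fst) ∧ (∀ k ∈ it.map Prod.fst, k ∈ efs)) :
    validate_and_collect_struct_values_py values efs name = validate_and_collect_struct_values_py_alt values efs name := by
  unfold validate_and_collect_struct_values_py validate_and_collect_struct_values_py_alt
  dsimp only
  set expected : PySem.Set String := PySem.Set.ofList efs with hexp
  have hnd : expected.Nodup := PySem.Set.nodup_ofList efs
  have hv : ∀ it ∈ values, PySem.Set.diff expected (PySem.Set.ofList (PySem.Dict.ofList it).keys) = [] ∧
      PySem.Set.diff (PySem.Set.ofList (PySem.Dict.ofList it).keys) expected = [] := by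
    intro it hit
    exact valid_of_pre efs it (hpre it hit).1 (hpre it hit).2
  have hall : values.all (vacsB_audit expected expected.length) = true := by
    rw [List.all_eq_true]
    intro it hit
    exact audit_of_pre efs it (hpre it hit).1 (hpre it hit).2
  rw [vacsA_loop_eq expected values hv]
  simp only [hall, if_true]
  set init := expected.foldl (fun d f => PySem.Dict.insert d f ([] : List Int)) PySem.Dict.empty with hinit
  set D := values.foldl (fun fv it => expected.foldl
      (fun acc f => acc.modify f [] (fun l => l ++ [PySem.Dict.getD (PySem.Dict.ofList it) f 0])) fv) init with hD
  have hik : init.keys = expected := by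
    rw [hinit, init_keys, hexp, PySem.Set.ofList_ofList]
  have hkeys : D.keys = expected := keys_outer expected values init hik
  have hitems : D.items = D.keys.map (fun k => (k, D.getD k [])) :=
    PySem.Dict.items_eq_map_keys D (by rw [hkeys]; exact hnd) []
  rw [hitems, hkeys]
  apply List.map_congr_left
  intro c hc
  rw [hD, getD_outer expected hnd values init c hc, hinit,
    init_getD expected PySem.Dict.empty (by simp)]
  simp

-- ===== VERDICT (by name: the statement is the Claim_ definition above) =====
theorem validate_and_collect_struct_values_py_spec : Claim_equal_validate_and_collect_struct_values_py := by
  intro values efs name _dom hpre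
  unfold Spec_validate_and_collect_struct_values_py
  exact vacs_main values efs name hpre
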